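-- pv_equiv track=rewrite | github.com/hghyhghy/Codechef-Coding-Ninja | Desktop/DSA/T86/subarrayrange.py | subarray_lies_in_range
-- ===== SOURCE A (Python) =====
-- def subarray_lies_in_range(array:list[int],x:int,y:int)->int:
--
--     n=len(array)
--     count = 0
--
--     for start in range(n):
--
--         max_element = array[start]
--
--         for end in range(start,n):
--
--             max_element=  max(max_element,array[end])
--
--             if x<=max_element<=y:
--
--                 count += 1
--
--     return count
-- ===== SOURCE B (Python) =====
-- def subarray_lies_in_range(array: list[int], x: int, y: int) -> int:
--     # Count subarrays with max in [x, y] as (# subarrays with max <= y) - (# subarrays with max <= x-1),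
--     # each computed in one pass via run lengths of elements <= bound.
--     if x > y:
--         return 0
--
--     def count_le(bound):
--         total = 0
--         run = 0
--         for v in array:
--             run = run + 1 if v <= bound else 0
--             total += run
--         return total
--
--     return count_le(y) - count_le(x - 1)
-- ===== Notes on version B (the rewrite author's own statement) =====
-- stated objective: faster
-- what changed: Replaces A's O(n^2) double loop over all (start,end) pairs with running maxima by two O(n) run-length passes: the answer is (# subarrays with max <= y) minus (# subarrays with max <= x-1), each counted in one pass by summing the length of the current run of elements <= bound.
import Mathlib
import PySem

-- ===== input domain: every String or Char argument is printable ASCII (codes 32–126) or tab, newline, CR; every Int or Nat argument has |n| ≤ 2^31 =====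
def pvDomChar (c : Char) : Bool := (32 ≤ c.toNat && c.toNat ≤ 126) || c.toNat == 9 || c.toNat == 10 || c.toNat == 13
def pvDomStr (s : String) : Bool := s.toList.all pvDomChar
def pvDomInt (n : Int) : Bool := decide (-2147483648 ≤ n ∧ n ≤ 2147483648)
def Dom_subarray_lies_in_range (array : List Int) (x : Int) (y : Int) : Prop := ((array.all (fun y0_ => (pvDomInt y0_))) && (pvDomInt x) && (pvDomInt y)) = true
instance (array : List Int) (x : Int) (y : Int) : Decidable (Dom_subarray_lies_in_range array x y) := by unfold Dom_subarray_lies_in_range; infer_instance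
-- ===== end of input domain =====

-- B replaces A's O(n^2) double loop by two O(n) run-length passes:
-- count of subarrays with max ≤ y minus count of subarrays with max ≤ x-1.

-- ===== PORT A =====
def subarray_lies_in_range (array : List Int) (x : Int) (y : Int) : Int :=
  let n : Int := (array.length : Int)
  (PySem.List.pyRange 0 n 1).foldl
    (fun count start =>
      let max_element := PySem.List.pyGetD array start 0
      ((PySem.List.pyRange start n 1).foldl
        (fun (st : Int × Int) e =>
          let m := max st.2 (PySem.List.pyGetD array e 0)
          (if x ≤ m ∧ m ≤ y then st.1 + 1 else st.1, m))
        (count, max_element)).1)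
    0

-- ===== PORT B =====
-- helper of B: one pass; run = length of the current run of elements ≤ bound
def pvCountLe (array : List Int) (bound : Int) : Int :=
  (array.foldl
    (fun (st : Int × Int) v =>
      let run := if v ≤ bound then st.2 + 1 else 0
      (st.1 + run, run))
    (0, 0)).1

def subarray_lies_in_range_alt (array : List Int) (x : Int) (y : Int) : Int :=
  if x > y then 0
  else pvCountLe array y - pvCountLe array (x - 1)

-- ===== PRECONDITION & SPEC =====
def Spec_subarray_lies_in_range (array : List Int) (x : Int) (y : Int) (out : Int) : Prop := out = subarray_lies_in_range_alt array x y
instance (array : List Int) (x : Int) (y : Int) (out : Int) : Decidable (Spec_subarray_lies_in_range array x y out) := by unfold Spec_subarray_lies_in_range; infer_instance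

-- ===== CLAIM (what is proved, stated in full; the proofs are below) =====
def Claim_equal_subarray_lies_in_range : Prop := ∀ (array : List Int) (x : Int) (y : Int), Dom_subarray_lies_in_range array x y → Spec_subarray_lies_in_range array x y (subarray_lies_in_range array x y)

-- ===== LEMMAS AND PROOFS =====

-- nonempty prefixes of a list
def pvNeps : List Int → List (List Int)
  | [] => []
  | a :: t => [a] :: (pvNeps t).map (a :: ·)

-- all nonempty contiguous segments, grouped by starting position
def pvSegs : List Int → List (List Int)
  | [] => []
  | a :: t => pvNeps (a :: t) ++ pvSegs t

-- maximum of a (nonempty) segment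
def pvSmax : List Int → Int
  | [] => 0
  | a :: t => t.foldl max a

-- running maxima, seeded with m
def pvRmx (m : Int) : List Int → List Int
  | [] => []
  | v :: t => max m v :: pvRmx (max m v) t

-- A's inner loop as a function of the suffix list
def pvInner (x y : Int) (st : Int × Int) (l : List Int) : Int × Int :=
  l.foldl
    (fun (st : Int × Int) v =>
      let m := max st.2 v
      (if x ≤ m ∧ m ≤ y then st.1 + 1 else st.1, m))
    st

theorem pvInner_fst (x y : Int) (l : List Int) :
    ∀ (c m : Int), (pvInner x y (c, m) l).1
      = c + ((pvRmx m l).countP (fun mm => decide (x ≤ mm ∧ mm ≤ y)) : Int) := by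
  induction l with
  | nil => intro c m; simp [pvInner, pvRmx]
  | cons v t ih =>
    intro c m
    show (pvInner x y ((if x ≤ max m v ∧ max m v ≤ y then c + 1 else c), max m v) t).1 = _
    rw [ih]
    simp only [pvRmx, List.countP_cons]
    by_cases h : x ≤ max m v ∧ max m v ≤ y <;> simp [h] <;> omega

theorem pvNeps_map_foldl_max (t : List Int) :
    ∀ a : Int, (pvNeps t).map (fun s => s.foldl max a) = pvRmx a t := by
  induction t with
  | nil => intro a; simp [pvNeps, pvRmx]
  | cons v t ih =>
    intro a
    simp only [pvNeps, pvRmx, List.map_cons, List.map_map, List.foldl_cons, List.foldl_nil]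
    rw [← ih (max a v)]
    rfl

theorem pvNeps_smax (a : Int) (t : List Int) :
    (pvNeps (a :: t)).map pvSmax = pvRmx a (a :: t) := by
  have h : (pvNeps (a :: t)).map pvSmax
      = (pvNeps (a :: t)).map (fun s => s.foldl max a) := by
    apply List.map_congr_left
    intro s hs
    rcases List.mem_cons.mp hs with rfl | hmem
    · simp [pvSmax]
    · obtain ⟨u, _, rfl⟩ := List.mem_map.mp hmem
      simp [pvSmax]
  rw [h, pvNeps_map_foldl_max]

theorem pvA_sum (x y : Int) (xs : List Int) :
    subarray_lies_in_range xs x y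
      = ((List.range xs.length).map
          (fun k => (pvInner x y (0, xs.getD k 0) (xs.drop k)).1)).sum := by
  show (PySem.List.pyRange 0 (xs.length : Int) 1).foldl _ 0 = _
  rw [PySem.List.pyRange_zero_nat, List.foldl_map]
  have hcong :
      List.foldl (fun (c : Int) (k : Nat) =>
        ((PySem.List.pyRange (k : Int) ((xs.length : Nat) : Int) 1).foldl
          (fun (st : Int × Int) e =>
            let m := max st.2 (PySem.List.pyGetD xs e 0)
            (if x ≤ m ∧ m ≤ y then st.1 + 1 else st.1, m))
          (c, PySem.List.pyGetD xs (k : Int) 0)).1) 0 (List.range xs.length)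
      = List.foldl (fun (c : Int) (k : Nat) =>
          c + (pvInner x y (0, xs.getD k 0) (xs.drop k)).1) 0 (List.range xs.length) := by
    apply PySem.List.foldl_congr_mem
    intro c k _
    have hfold :
        (PySem.List.pyRange (k : Int) ((xs.length : Nat) : Int) 1).foldl
          (fun (st : Int × Int) e =>
            let m := max st.2 (PySem.List.pyGetD xs e 0)
            (if x ≤ m ∧ m ≤ y then st.1 + 1 else st.1, m))
          (c, PySem.List.pyGetD xs (k : Int) 0)
        = pvInner x y (c, PySem.List.pyGetD xs (k : Int) 0) (xs.drop k) :=
      PySem.List.foldl_pyRange_pyGetD' xs 0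
        (fun (st : Int × Int) v =>
          let m := max st.2 v
          (if x ≤ m ∧ m ≤ y then st.1 + 1 else st.1, m))
        (c, PySem.List.pyGetD xs (k : Int) 0) (Int.natCast_nonneg k)
    rw [hfold, PySem.List.pyGetD_natCast, pvInner_fst, pvInner_fst]
    omega
  exact hcong.trans (by
    simpa using PySem.List.foldl_add (List.range xs.length)
      (fun k => (pvInner x y (0, xs.getD k 0) (xs.drop k)).1) 0)

theorem pvSum_count (x y : Int) (xs : List Int) :
    ((List.range xs.length).map
        (fun k => (pvInner x y (0, xs.getD k 0) (xs.drop k)).1)).sum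
      = ((pvSegs xs).countP (fun s => decide (x ≤ pvSmax s ∧ pvSmax s ≤ y)) : Int) := by
  induction xs with
  | nil => simp [pvSegs]
  | cons a t ih =>
    rw [show (a :: t).length = t.length + 1 from rfl, List.range_succ_eq_map,
      List.map_cons, List.map_map, List.sum_cons]
    have htail : (List.map
          ((fun k => (pvInner x y (0, (a :: t).getD k 0) ((a :: t).drop k)).1) ∘ Nat.succ)
          (List.range t.length))
        = (List.range t.length).map (fun k => (pvInner x y (0, t.getD k 0) (t.drop k)).1) := by
      apply List.map_congr_left
      intro k _
      rfl
    rw [htail, ih]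
    have hhead : (pvInner x y (0, (a :: t).getD 0 0) ((a :: t).drop 0)).1
        = ((pvNeps (a :: t)).countP
            (fun s => decide (x ≤ pvSmax s ∧ pvSmax s ≤ y)) : Int) := by
      rw [show ((a :: t).getD 0 0) = a from rfl, show ((a :: t).drop 0) = a :: t from rfl]
      rw [pvInner_fst, ← pvNeps_smax, List.countP_map, Function.comp_def]
      omega
    rw [hhead, show pvSegs (a :: t) = pvNeps (a :: t) ++ pvSegs t from rfl,
      List.countP_append]
    push_cast
    ring

theorem pvA_count (x y : Int) (xs : List Int) :
    subarray_lies_in_range xs x y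
      = ((pvSegs xs).countP (fun s => decide (x ≤ pvSmax s ∧ pvSmax s ≤ y)) : Int) := by
  rw [pvA_sum, pvSum_count]

-- B side
def pvPlen (b : Int) : List Int → Nat
  | [] => 0
  | v :: t => if v ≤ b then 1 + pvPlen b t else 0

def pvG (b c r : Int) (l : List Int) : Int :=
  (l.foldl
    (fun (st : Int × Int) v =>
      let run := if v ≤ b then st.2 + 1 else 0
      (st.1 + run, run))
    (c, r)).1

theorem pvG_cons (b c r v : Int) (t : List Int) :
    pvG b c r (v :: t)
      = pvG b (c + (if v ≤ b then r + 1 else 0)) (if v ≤ b then r + 1 else 0) t := rfl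

theorem pvG_split (b : Int) (l : List Int) :
    ∀ c r : Int, pvG b c r l = c + pvG b 0 0 l + r * (pvPlen b l : Int) := by
  induction l with
  | nil => intro c r; simp [pvG, pvPlen]
  | cons v t ih =>
    intro c r
    rw [pvG_cons, pvG_cons]
    by_cases h : v ≤ b
    · have e1 := ih (c + (r + 1)) (r + 1)
      have e2 := ih (0 + (0 + 1)) (0 + 1)
      simp only [h, if_true, pvPlen]
      rw [e1, e2]
      push_cast
      ring
    · have e1 := ih (c + 0) 0
      have e2 := ih (0 + 0) 0
      simp only [h, if_false, pvPlen]
      rw [e1, e2]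
      push_cast
      ring

theorem pvNeps_countP_all (b : Int) (t : List Int) :
    (pvNeps t).countP (fun s => s.all (· ≤ b)) = pvPlen b t := by
  induction t with
  | nil => simp [pvNeps, pvPlen]
  | cons v t ih =>
    simp only [pvNeps, pvPlen, List.countP_cons, List.countP_map]
    by_cases h : v ≤ b
    · have hc : (pvNeps t).countP ((fun s => s.all (· ≤ b)) ∘ (v :: ·))
          = (pvNeps t).countP (fun s => s.all (· ≤ b)) := by
        apply List.countP_congr
        intro s _
        simp [h]
      rw [hc, ih]
      simp [h]
      omega
    · have hc : (pvNeps t).countP ((fun s => s.all (· ≤ b)) ∘ (v :: ·)) = 0 := by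
        rw [List.countP_eq_zero]
        intro s _
        simp [h]
      rw [hc]
      simp [h]

theorem pvG_count (b : Int) (l : List Int) :
    pvG b 0 0 l = ((pvSegs l).countP (fun s => s.all (· ≤ b)) : Int) := by
  induction l with
  | nil => simp [pvG, pvSegs]
  | cons v t ih =>
    rw [pvG_cons]
    by_cases h : v ≤ b
    · simp only [h, if_true]
      rw [pvG_split, ih]
      simp only [pvSegs, List.countP_append, pvNeps, List.countP_cons, List.countP_map]
      have h2 : (pvNeps t).countP ((fun s => s.all (· ≤ b)) ∘ (v :: ·))
          = pvPlen b t := by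
        rw [← pvNeps_countP_all b t]
        apply List.countP_congr
        intro s _
        simp [Function.comp, List.all_cons, h]
      rw [h2]
      simp [List.all_cons, h]
      omega
    · simp only [h, if_false]
      rw [pvG_split, ih]
      simp only [pvSegs, List.countP_append, pvNeps, List.countP_cons, List.countP_map]
      have h2 : (pvNeps t).countP ((fun s => s.all (· ≤ b)) ∘ (v :: ·)) = 0 := by
        rw [List.countP_eq_zero]
        intro s _
        simp [Function.comp, List.all_cons, h]
      rw [h2]
      simp [List.all_cons, h]

theorem pvSegs_ne_nil (l : List Int) : ∀ s ∈ pvSegs l, s ≠ [] := by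
  induction l with
  | nil => simp [pvSegs]
  | cons v t ih =>
    intro s hs
    simp only [pvSegs, List.mem_append] at hs
    rcases hs with hs | hs
    · revert hs
      show s ∈ [v] :: (pvNeps t).map (v :: ·) → s ≠ []
      intro hs
      rcases List.mem_cons.mp hs with h | h
      · subst h; simp
      · obtain ⟨u, _, rfl⟩ := List.mem_map.mp h
        simp
    · exact ih s hs

theorem pvAll_iff_smax (s : List Int) (hs : s ≠ []) (b : Int) :
    (s.all (· ≤ b)) = decide (pvSmax s ≤ b) := by
  cases s with
  | nil => exact absurd rfl hs
  | cons a t =>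
    have hiff : List.foldl max a t ≤ b ↔ (a ≤ b ∧ ∀ v ∈ t, v ≤ b) := by
      constructor
      · intro h
        exact ⟨le_trans (PySem.List.le_foldl_max t a).1 h,
          fun v hv => le_trans ((PySem.List.le_foldl_max t a).2 v hv) h⟩
      · rintro ⟨h1, h2⟩
        rcases PySem.List.foldl_max_mem t a with he | he
        · rw [he]; exact h1
        · exact h2 _ he
    rw [Bool.eq_iff_iff]
    simp [pvSmax, hiff, List.all_eq_true]

theorem pvCountLe_count (b : Int) (l : List Int) :
    pvCountLe l b = ((pvSegs l).countP (fun s => decide (pvSmax s ≤ b)) : Int) := by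
  have h0 : pvCountLe l b = pvG b 0 0 l := rfl
  rw [h0, pvG_count]
  congr 1
  apply List.countP_congr
  intro s hs
  rw [pvAll_iff_smax s (pvSegs_ne_nil l s hs) b]

theorem pvCountP_sub {α : Type} (L : List α) (p q : α → Bool)
    (h : ∀ s ∈ L, q s = true → p s = true) :
    ((L.countP (fun s => p s && !q s)) : Int) = (L.countP p : Int) - (L.countP q : Int) := by
  induction L with
  | nil => simp
  | cons a t ih =>
    have ih' := ih (fun s hs => h s (List.mem_cons_of_mem a hs))
    simp only [List.countP_cons]
    by_cases hq : q a = true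
    · have hp := h a List.mem_cons_self hq
      simp only [hq, hp, Bool.not_true, Bool.and_false]
      push_cast
      omega
    · simp only [Bool.not_eq_true] at hq
      simp only [hq, Bool.not_false, Bool.and_true]
      by_cases hp : p a = true <;> simp only [hp, Bool.false_eq_true, if_true, if_false] <;>
        push_cast <;> omega

-- ===== VERDICT (by name: the statement is the Claim_ definition above) =====
theorem subarray_lies_in_range_spec : Claim_equal_subarray_lies_in_range := by
  intro array x y _
  show subarray_lies_in_range array x y = subarray_lies_in_range_alt array x y
  rw [pvA_count, subarray_lies_in_range_alt]
  by_cases hxy : x > y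
  · rw [if_pos hxy]
    have h : ((pvSegs array).countP (fun s => decide (x ≤ pvSmax s ∧ pvSmax s ≤ y))) = 0 := by
      rw [List.countP_eq_zero]
      intro s _
      simp only [decide_eq_true_eq]
      intro ⟨h1, h2⟩
      omega
    rw [h]
    rfl
  · rw [if_neg hxy]
    rw [pvCountLe_count, pvCountLe_count]
    rw [← pvCountP_sub _ _ _ (fun s _ hq => by
      simp only [decide_eq_true_eq] at hq ⊢
      omega)]
    congr 1
    apply List.countP_congr
    intro s _
    simp only [decide_eq_true_eq, Bool.and_eq_true, Bool.not_eq_true',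
      decide_eq_false_iff_not]
    constructor
    · intro ⟨h1, h2⟩; exact ⟨h2, by omega⟩
    · intro ⟨h1, h2⟩; exact ⟨by omega, h1⟩
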